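-- pv_equiv track=rewrite | github.com/NithishKolli/Competitive-Programming | AdventOfCode/2021/day_3.py | gamma_epsilon
-- ===== SOURCE A (Python) =====
-- def gamma_epsilon(input):
--     n_bin_numbers = len(input)
--     n_bits = len(input[0])
--     gamma = [0]*n_bits
--     epsilon = [0] * n_bits
--     for bin_number in input:
--         for i in range(n_bits):
--             if int(bin_number[i]) == 0:
--                 gamma[i] -= 1
--             else:
--                 gamma[i] += 1
--     for i in range(n_bits):
--         if gamma[i] >=0:
--             gamma[i] = 1
--         else:
--             gamma[i] = 0
--             epsilon[i] = 1
--     return gamma, epsilon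
-- ===== SOURCE B (Python) =====
-- def gamma_epsilon(input):
--     n_bits = len(input[0])
--     n = len(input)
--     gamma, epsilon = [], []
--     for i in range(n_bits):
--         ones = sum(1 for row in input if int(row[i]) != 0)
--         if ones >= n - ones:
--             gamma.append(1)
--             epsilon.append(0)
--         else:
--             gamma.append(0)
--             epsilon.append(1)
--     return gamma, epsilon
-- ===== Notes on version B (the rewrite author's own statement) =====
-- stated objective: idiomatic
-- what changed: Replaces the row-by-row signed accumulator with two in-place fix-up passes over mutable arrays by a single column-oriented pass that counts ones per bit position and appends the thresholded gamma/epsilon bits directly.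
import Mathlib
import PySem

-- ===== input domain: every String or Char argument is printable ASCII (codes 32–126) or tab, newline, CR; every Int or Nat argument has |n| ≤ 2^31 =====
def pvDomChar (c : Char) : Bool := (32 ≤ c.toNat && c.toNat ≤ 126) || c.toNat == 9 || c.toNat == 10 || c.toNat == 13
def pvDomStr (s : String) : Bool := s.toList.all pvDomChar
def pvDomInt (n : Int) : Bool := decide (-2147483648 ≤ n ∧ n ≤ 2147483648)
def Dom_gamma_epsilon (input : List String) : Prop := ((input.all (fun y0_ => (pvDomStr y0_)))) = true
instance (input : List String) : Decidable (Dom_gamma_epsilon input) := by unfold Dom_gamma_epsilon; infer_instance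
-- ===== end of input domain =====

-- ===== PORT A =====
-- Header: B replaces A's row-major signed accumulator and two fix-up passes by one
-- column-oriented count-and-threshold pass (idiomatic decomposition; same cost).
-- int(s[i]) for one character, total via defaults; exact whenever 0 <= i < len and the char is a digit (Pre_)
def pyDigitAt (row : String) (i : Nat) : Int :=
  (PySem.Int.ofChars? [((PySem.Str.pyGet? row (i : Int)).getD '0')]).getD 0

def gamma_epsilon (input : List String) : List Int × List Int :=
  let n_bits := ((PySem.List.pyGet? input 0).getD "").toList.length
  let gamma : List Int :=
    input.foldl (fun g bin_number =>
      (List.range n_bits).foldl (fun g i =>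
        if pyDigitAt bin_number i = 0 then g.set i (g.getD i 0 - 1)
        else g.set i (g.getD i 0 + 1)) g)
      (List.replicate n_bits 0)
  let ge :=
    (List.range n_bits).foldl (fun (ge : List Int × List Int) i =>
      if 0 ≤ ge.1.getD i 0 then (ge.1.set i 1, ge.2)
      else (ge.1.set i 0, ge.2.set i 1)) (gamma, List.replicate n_bits 0)
  ge

-- ===== PORT B =====
def gamma_epsilon_alt (input : List String) : List Int × List Int :=
  let n_bits := ((PySem.List.pyGet? input 0).getD "").toList.length
  let n : Int := input.length
  (List.range n_bits).foldl (fun (ge : List Int × List Int) i =>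
    let ones : Int := input.foldl (fun acc row => if pyDigitAt row i ≠ 0 then acc + 1 else acc) 0
    if n - ones ≤ ones then (ge.1 ++ [1], ge.2 ++ [0]) else (ge.1 ++ [0], ge.2 ++ [1]))
    ([], [])

-- ===== PRECONDITION & SPEC =====
-- Pre_ excludes exactly the inputs where Python A raises: the empty list (IndexError on input[0]),
-- rows shorter than len(input[0]) (IndexError), and non-digit characters in the first
-- len(input[0]) positions of a row (ValueError from int()).
def Pre_gamma_epsilon (input : List String) : Prop :=
  input ≠ [] ∧ input.all (fun s =>
    decide ((input.headD "").toList.length ≤ s.toList.length) &&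
    (s.toList.take (input.headD "").toList.length).all Char.isDigit) = true
instance (input : List String) : Decidable (Pre_gamma_epsilon input) := by unfold Pre_gamma_epsilon; infer_instance
def pvWitness_gamma_epsilon : List String := ["010", "111", "000"]

def Spec_gamma_epsilon (input : List String) (out : List Int × List Int) : Prop := out = gamma_epsilon_alt input
instance (input : List String) (out : List Int × List Int) : Decidable (Spec_gamma_epsilon input out) := by unfold Spec_gamma_epsilon; infer_instance

-- ===== CLAIM (what is proved, stated in full; the proofs are below) =====
def Claim_equal_gamma_epsilon : Prop := ∀ (input : List String), Dom_gamma_epsilon input → Pre_gamma_epsilon input → Spec_gamma_epsilon input (gamma_epsilon input)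

-- ===== LEMMAS AND PROOFS =====
def dI (row : String) (i : Nat) : Int := if pyDigitAt row i = 0 then -1 else 1

def onesCnt (input : List String) (i : Nat) : Int :=
  input.foldl (fun acc row => if pyDigitAt row i ≠ 0 then acc + 1 else acc) 0

def pvF (input : List String) (i : Nat) : Int × Int :=
  if (input.length : Int) - onesCnt input i ≤ onesCnt input i then (1, 0) else (0, 1)

theorem getD_set_eq_ite (l : List Int) (i j : Nat) (v d : Int) :
    (l.set i v).getD j d = if i = j ∧ j < l.length then v else l.getD j d := by
  simp only [List.getD_eq_getElem?_getD, List.getElem?_set]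
  by_cases hij : i = j
  · subst hij
    by_cases hlt : i < l.length
    · simp [hlt]
    · have h1 : l[i]? = none := List.getElem?_eq_none_iff.2 (by omega)
      rw [h1]
      simp [hlt]
  · simp [hij]

-- generic single sweep of in-place updates over distinct indices
theorem foldl_set_self (f : Nat → Int → Int) :
    ∀ (l : List Nat) (g : List Int), l.Nodup →
      ((l.foldl (fun g i => g.set i (f i (g.getD i 0))) g).length = g.length) ∧
      (∀ j, (l.foldl (fun g i => g.set i (f i (g.getD i 0))) g).getD j 0 =
        if j ∈ l ∧ j < g.length then f j (g.getD j 0) else g.getD j 0) := by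
  intro l
  induction l with
  | nil => intro g _; simp
  | cons i t ih =>
    intro g hnd
    rcases List.nodup_cons.mp hnd with ⟨hi, hnd'⟩
    have H := ih (g.set i (f i (g.getD i 0))) hnd'
    refine ⟨by simpa using H.1, ?_⟩
    intro j
    rw [List.foldl_cons, H.2 j]
    simp only [List.length_set, getD_set_eq_ite, List.mem_cons]
    by_cases hji : j = i
    · subst hji
      simp [hi]
    · have hij : ¬ (i = j) := fun h => hji h.symm
      simp only [hji, hij, false_and, if_false, false_or]

-- the inner row loop of A, as a pointwise delta
theorem inner_row (row : String) (n : Nat) (g : List Int) (hg : g.length = n) :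
    (((List.range n).foldl (fun g i =>
        if pyDigitAt row i = 0 then g.set i (g.getD i 0 - 1) else g.set i (g.getD i 0 + 1)) g).length = n) ∧
    (∀ j, ((List.range n).foldl (fun g i =>
        if pyDigitAt row i = 0 then g.set i (g.getD i 0 - 1) else g.set i (g.getD i 0 + 1)) g).getD j 0 =
      if j < n then g.getD j 0 + dI row j else g.getD j 0) := by
  have hstep : (fun (g : List Int) i =>
      if pyDigitAt row i = 0 then g.set i (g.getD i 0 - 1) else g.set i (g.getD i 0 + 1)) =
      (fun (g : List Int) i => g.set i ((fun i v => v + dI row i) i (g.getD i 0))) := by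
    funext g i
    by_cases h : pyDigitAt row i = 0 <;> simp [dI, h, sub_eq_add_neg]
  rw [hstep]
  have H := foldl_set_self (fun i v => v + dI row i) (List.range n) g List.nodup_range
  refine ⟨by rw [H.1, hg], ?_⟩
  intro j
  rw [H.2 j, hg]
  simp [List.mem_range]

-- outer loop of A: the accumulator holds the per-column signed sum
theorem outer_loop (n : Nat) :
    ∀ (l : List String) (g : List Int), g.length = n →
      ((l.foldl (fun g row => (List.range n).foldl (fun g i =>
          if pyDigitAt row i = 0 then g.set i (g.getD i 0 - 1) else g.set i (g.getD i 0 + 1)) g) g).length = n) ∧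
      (∀ j, j < n → (l.foldl (fun g row => (List.range n).foldl (fun g i =>
          if pyDigitAt row i = 0 then g.set i (g.getD i 0 - 1) else g.set i (g.getD i 0 + 1)) g) g).getD j 0 =
        g.getD j 0 + (l.map (fun row => dI row j)).sum) := by
  intro l
  induction l with
  | nil => intro g hg; exact ⟨hg, fun j _ => by simp⟩
  | cons row t ih =>
    intro g hg
    have Hrow := inner_row row n g hg
    have H := ih _ Hrow.1
    refine ⟨H.1, ?_⟩
    intro j hj
    rw [List.foldl_cons, H.2 j hj, Hrow.2 j]
    simp only [hj, if_true, List.map_cons, List.sum_cons]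
    ring

-- A's second pass: thresholding in place
theorem pass2 :
    ∀ (l : List Nat) (g e : List Int), l.Nodup →
      (((l.foldl (fun (ge : List Int × List Int) i =>
          if 0 ≤ ge.1.getD i 0 then (ge.1.set i 1, ge.2) else (ge.1.set i 0, ge.2.set i 1)) (g, e)).1.length = g.length) ∧
       ((l.foldl (fun (ge : List Int × List Int) i =>
          if 0 ≤ ge.1.getD i 0 then (ge.1.set i 1, ge.2) else (ge.1.set i 0, ge.2.set i 1)) (g, e)).2.length = e.length) ∧
       (∀ j, (l.foldl (fun (ge : List Int × List Int) i =>
          if 0 ≤ ge.1.getD i 0 then (ge.1.set i 1, ge.2) else (ge.1.set i 0, ge.2.set i 1)) (g, e)).1.getD j 0 =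
          if j ∈ l ∧ j < g.length then (if 0 ≤ g.getD j 0 then 1 else 0) else g.getD j 0) ∧
       (∀ j, (l.foldl (fun (ge : List Int × List Int) i =>
          if 0 ≤ ge.1.getD i 0 then (ge.1.set i 1, ge.2) else (ge.1.set i 0, ge.2.set i 1)) (g, e)).2.getD j 0 =
          if j ∈ l ∧ j < e.length ∧ ¬ 0 ≤ g.getD j 0 then 1 else e.getD j 0)) := by
  intro l
  induction l with
  | nil => intro g e _; simp
  | cons i t ih =>
    intro g e hnd
    rcases List.nodup_cons.mp hnd with ⟨hi, hnd'⟩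
    by_cases hc : 0 ≤ g.getD i 0
    · have H := ih (g.set i 1) e hnd'
      rw [List.foldl_cons]
      simp only [hc, if_pos]
      refine ⟨by simpa using H.1, H.2.1, ?_, ?_⟩
      · intro j
        rw [H.2.2.1 j]
        clear H ih hnd hnd'
        simp only [List.length_set, getD_set_eq_ite, List.mem_cons]
        by_cases hji : j = i
        · subst hji
          simp only [hi, or_false, true_and]
          split_ifs <;> first | rfl | tauto
        · have hij : ¬ (i = j) := fun h => hji h.symm
          simp only [hji, hij, false_and, if_false, false_or]
      · intro j
        rw [H.2.2.2 j]
        clear H ih hnd hnd'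
        simp only [getD_set_eq_ite, List.mem_cons]
        by_cases hji : j = i
        · subst hji
          simp only [hi, or_false, true_and]
          split_ifs <;> first | rfl | tauto
        · have hij : ¬ (i = j) := fun h => hji h.symm
          simp only [hji, hij, false_and, if_false, false_or]
    · have H := ih (g.set i 0) (e.set i 1) hnd'
      rw [List.foldl_cons]
      simp only [hc, if_false]
      refine ⟨by simpa using H.1, by simpa using H.2.1, ?_, ?_⟩
      · intro j
        rw [H.2.2.1 j]
        clear H ih hnd hnd'
        simp only [List.length_set, getD_set_eq_ite, List.mem_cons]
        by_cases hji : j = i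
        · subst hji
          simp only [hi, or_false, true_and]
          split_ifs <;> first | rfl | tauto
        · have hij : ¬ (i = j) := fun h => hji h.symm
          simp only [hji, hij, false_and, if_false, false_or]
      · intro j
        rw [H.2.2.2 j]
        clear H ih hnd hnd'
        simp only [List.length_set, getD_set_eq_ite, List.mem_cons]
        by_cases hji : j = i
        · subst hji
          simp only [hi, or_false, true_and]
          split_ifs <;> first | rfl | tauto
        · have hij : ¬ (i = j) := fun h => hji h.symm
          simp only [hji, hij, false_and, if_false, false_or]

-- B's loop: two parallel appends are two maps
theorem foldl_pair_append (F : Nat → Int × Int) :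
    ∀ (l : List Nat) (p : List Int × List Int),
      l.foldl (fun ge i => (ge.1 ++ [(F i).1], ge.2 ++ [(F i).2])) p =
        (p.1 ++ l.map (fun i => (F i).1), p.2 ++ l.map (fun i => (F i).2)) := by
  intro l
  induction l with
  | nil => intro p; simp
  | cons i t ih => intro p; simp [ih]

-- the signed column sum is 2 * (number of ones) - (number of rows)
theorem sum_dI (i : Nat) :
    ∀ l : List String,
      (l.map (fun row => dI row i)).sum =
        2 * (l.countP (fun row => decide (pyDigitAt row i ≠ 0)) : Int) - l.length := by
  intro l
  induction l with
  | nil => simp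
  | cons row t ih =>
    rw [List.map_cons, List.sum_cons, List.countP_cons, ih, List.length_cons]
    by_cases h : pyDigitAt row i = 0
    · simp [dI, h]
      ring
    · simp [dI, h]
      ring

-- B computed in closed form
theorem alt_eq (input : List String) :
    gamma_epsilon_alt input =
      ((List.range ((PySem.List.pyGet? input 0).getD "").toList.length).map (fun i => (pvF input i).1),
       (List.range ((PySem.List.pyGet? input 0).getD "").toList.length).map (fun i => (pvF input i).2)) := by
  simp only [gamma_epsilon_alt]
  have h : (fun (ge : List Int × List Int) (i : Nat) =>
      let ones : Int := input.foldl (fun acc row => if pyDigitAt row i ≠ 0 then acc + 1 else acc) 0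
      if (input.length : Int) - ones ≤ ones then (ge.1 ++ [1], ge.2 ++ [0]) else (ge.1 ++ [0], ge.2 ++ [1]))
      = (fun (ge : List Int × List Int) i => (ge.1 ++ [(pvF input i).1], ge.2 ++ [(pvF input i).2])) := by
    funext ge i
    simp only [pvF, onesCnt]
    split_ifs <;> rfl
  rw [h, foldl_pair_append]
  simp

-- the two programs, column by column
theorem main_eq (input : List String) : gamma_epsilon input = gamma_epsilon_alt input := by
  rw [alt_eq]
  simp only [gamma_epsilon]
  set n := ((PySem.List.pyGet? input 0).getD "").toList.length with hn
  have HG := outer_loop n input (List.replicate n (0:Int)) (by simp)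
  set G := input.foldl (fun g bin_number => (List.range n).foldl (fun g i =>
      if pyDigitAt bin_number i = 0 then g.set i (g.getD i 0 - 1) else g.set i (g.getD i 0 + 1)) g)
      (List.replicate n (0:Int)) with hGdef
  have HP := pass2 (List.range n) G (List.replicate n (0:Int)) List.nodup_range
  have hval : ∀ j, j < n →
      (0 ≤ G.getD j 0 ↔ (input.length : Int) - onesCnt input j ≤ onesCnt input j) := by
    intro j hj
    have h1 := HG.2 j hj
    have h2 := sum_dI j input
    have h3 : onesCnt input j = 0 + (input.countP (fun row => decide (pyDigitAt row j ≠ 0)) : Int) := by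
      simpa [onesCnt] using PySem.List.foldl_ite_add_one (fun row => pyDigitAt row j ≠ 0) (l := input) (a := 0)
    have h4 : (input.countP (fun row => decide (pyDigitAt row j ≠ 0)) : Int) ≤ input.length := by
      exact_mod_cast List.countP_le_length
    rw [h1, h2, h3]
    simp
    omega
  rw [Prod.ext_iff]
  constructor
  · apply List.ext_getElem
    · rw [HP.1, HG.1]
      simp
    · intro j h1 h2
      have hj : j < n := by rw [HP.1, HG.1] at h1; exact h1
      rw [← List.getD_eq_getElem _ 0 h1, HP.2.2.1 j]
      simp only [List.getElem_map, List.getElem_range]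
      have hmem : j ∈ List.range n := List.mem_range.2 hj
      have hjG : j < G.length := by rw [HG.1]; exact hj
      rw [if_pos ⟨hmem, hjG⟩]
      have hiff := hval j hj
      simp only [pvF]
      by_cases hthr : 0 ≤ G.getD j 0
      · rw [if_pos hthr, if_pos (hiff.mp hthr)]
      · rw [if_neg hthr, if_neg (fun h => hthr (hiff.mpr h))]
  · apply List.ext_getElem
    · rw [HP.2.1]
      simp
    · intro j h1 h2
      have hj : j < n := by rw [HP.2.1, List.length_replicate] at h1; exact h1
      rw [← List.getD_eq_getElem _ 0 h1, HP.2.2.2 j]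
      simp only [List.getElem_map, List.getElem_range]
      have hmem : j ∈ List.range n := List.mem_range.2 hj
      have hje : j < (List.replicate n (0:Int)).length := by simpa using hj
      have hiff := hval j hj
      simp only [pvF]
      by_cases hthr : 0 ≤ G.getD j 0
      · rw [if_neg (fun h => h.2.2 hthr), if_pos (hiff.mp hthr)]
        simp
      · rw [if_pos ⟨hmem, hje, hthr⟩, if_neg (fun h => hthr (hiff.mpr h))]

-- ===== VERDICT (by name: the statement is the Claim_ definition above) =====
theorem gamma_epsilon_spec : Claim_equal_gamma_epsilon := by
  intro input _ _
  exact main_eq input
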